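-- pv_equiv track=rewrite | github.com/scott-sattler/sudoku-solver | file_io.py | convert_3d_board_to_str
-- ===== SOURCE A (Python) =====
-- def convert_3d_board_to_str(board: list[list[list[int]]]) -> str:
--     """
--         converts from 3d CellData matrix format to string format
--         board_str
--         note_str_1
--         note_str_2
--         ...
--         note_str_9
--         locked_state
--     """
--     n, m = len(board), len(board[0])
--
--     locked_state = list()
--     for i in range(n):
--         for j in range(m):
--             char = str(board[i][j][-1])
--             locked_state.append(char)
--     locked_state = ''.join(locked_state)
--
--     board_str = list()
--     for i in range(n):
--         for j in range(m):
--             char = str(board[i][j][0])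
--             if char == '0':
--                 char = '.'
--             board_str.append(char)
--     board_str = ''.join(board_str)
--
--     # zero-indexed
--     notes_strs = [list() for _ in range(1, 10)]
--     for i in range(n):
--         for j in range(m):
--             notes = board[i][j][:]  # todo
--             for k in range(1, 10):
--                 note = str(notes[k])
--                 if note == '0':
--                     note = '.'
--                 notes_strs[k - 1].append(note)
--
--     notes_strs = '\n'.join([''.join(note_str) for note_str in notes_strs])
--
--     return board_str + '\n' + notes_strs + '\n' + locked_state
-- ===== SOURCE B (Python) =====
-- def _sub(v):
--     s = str(v)
--     return '.' if s == '0' else s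
--
--
-- def convert_3d_board_to_str(board: list[list[list[int]]]) -> str:
--     m = len(board[0])
--     board_buf = ''
--     note_bufs = [''] * 9
--     locked_buf = ''
--     for row in board:
--         for cell in row[:m]:
--             board_buf += _sub(cell[0])
--             note_bufs = [b + _sub(cell[k + 1]) for k, b in enumerate(note_bufs)]
--             locked_buf += str(cell[-1])
--     return board_buf + '\n' + '\n'.join(note_bufs) + '\n' + locked_buf
-- ===== Notes on version B (the rewrite author's own statement) =====
-- stated objective: alternative
-- what changed: A makes three separate full-board index sweeps (locked pass, board-char pass, then a pass filling nine note buffers via notes_strs[k-1] index arithmetic); B iterates rows/cells directly in ONE row-major pass that extends the board buffer, the nine note buffers and the locked buffer per cell, then joins once.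
import Mathlib
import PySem

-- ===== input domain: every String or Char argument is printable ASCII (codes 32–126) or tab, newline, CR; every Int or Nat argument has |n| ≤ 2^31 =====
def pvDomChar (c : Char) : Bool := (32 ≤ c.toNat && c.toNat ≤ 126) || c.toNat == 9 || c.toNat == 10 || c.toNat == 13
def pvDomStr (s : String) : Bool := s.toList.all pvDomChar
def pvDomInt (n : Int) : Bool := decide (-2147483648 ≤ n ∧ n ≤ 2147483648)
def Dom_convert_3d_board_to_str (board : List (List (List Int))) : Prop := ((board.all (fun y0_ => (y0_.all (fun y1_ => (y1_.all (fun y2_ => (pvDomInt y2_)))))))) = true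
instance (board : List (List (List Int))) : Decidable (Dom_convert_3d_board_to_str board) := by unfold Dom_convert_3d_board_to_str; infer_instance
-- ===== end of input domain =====

-- B fuses A's three separate full-board sweeps (locked, board chars, nine note rows) into ONE row-major
-- pass that extends all eleven buffers per cell (objective: alternative decomposition, same output).
-- Python strings are ported as List Char (PySem.Int.toChars = str), and 'append pieces to a list then
-- ''.join' is ported as direct char-list concatenation (exact); the final String.mk packs the result.

-- ===== PORT A =====
def convert_3d_board_to_str (board : List (List (List Int))) : String :=
  let n : Int := board.length
  let m : Int := ((PySem.List.pyGet? board 0).getD []).length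
  let locked : List Char :=
    (PySem.List.pyRange 0 n 1).foldl (fun acc i =>
      (PySem.List.pyRange 0 m 1).foldl (fun acc j =>
        acc ++ PySem.Int.toChars
          (PySem.List.pyGetD (PySem.List.pyGetD (PySem.List.pyGetD board i []) j []) (-1) 0)) acc) []
  let bstr : List Char :=
    (PySem.List.pyRange 0 n 1).foldl (fun acc i =>
      (PySem.List.pyRange 0 m 1).foldl (fun acc j =>
        let c := PySem.Int.toChars
          (PySem.List.pyGetD (PySem.List.pyGetD (PySem.List.pyGetD board i []) j []) 0 0)
        let c := if c = ['0'] then ['.'] else c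
        acc ++ c) acc) []
  let notes0 : List (List Char) := (PySem.List.pyRange 1 10 1).map (fun _ => [])
  let notes : List (List Char) :=
    (PySem.List.pyRange 0 n 1).foldl (fun bufs i =>
      (PySem.List.pyRange 0 m 1).foldl (fun bufs j =>
        let notesCell := PySem.List.slice (PySem.List.pyGetD (PySem.List.pyGetD board i []) j []) none none
        (PySem.List.pyRange 1 10 1).foldl (fun bufs k =>
          let note := PySem.Int.toChars (PySem.List.pyGetD notesCell k 0)
          let note := if note = ['0'] then ['.'] else note
          bufs.modify (k - 1).toNat (· ++ note)) bufs) bufs) notes0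
  String.mk (bstr ++ ['\n'] ++ PySem.Chars.join ['\n'] notes ++ ['\n'] ++ locked)

-- ===== PORT B =====
-- _sub in Source B
def pvSub (v : Int) : List Char :=
  let s := PySem.Int.toChars v
  if s = ['0'] then ['.'] else s

def convert_3d_board_to_str_alt (board : List (List (List Int))) : String :=
  let m : Int := ((PySem.List.pyGet? board 0).getD []).length
  let st : List Char × List (List Char) × List Char :=
    board.foldl (fun st row =>
      (PySem.List.slice row none (some m)).foldl (fun st cell =>
        ( st.1 ++ pvSub (PySem.List.pyGetD cell 0 0),
          (PySem.List.enumerate st.2.1).map (fun kb => kb.2 ++ pvSub (PySem.List.pyGetD cell (kb.1 + 1) 0)),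
          st.2.2 ++ PySem.Int.toChars (PySem.List.pyGetD cell (-1) 0) )) st)
      (([] : List Char), List.replicate 9 ([] : List Char), ([] : List Char))
  String.mk (st.1 ++ ['\n'] ++ PySem.Chars.join ['\n'] st.2.1 ++ ['\n'] ++ st.2.2)

-- ===== PRECONDITION & SPEC =====
-- Exactly the inputs on which the Python A returns: a non-empty board whose rows all have at least
-- m = len(board[0]) cells, each of the first m cells having at least 10 entries (A indexes cell[k]
-- for k in 0..9); on anything else Python A raises IndexError.
def Pre_convert_3d_board_to_str (board : List (List (List Int))) : Prop :=
  board ≠ [] ∧ ∀ row ∈ board, (board.headD []).length ≤ row.length ∧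
    ∀ cell ∈ row.take (board.headD []).length, 10 ≤ cell.length
instance (board : List (List (List Int))) : Decidable (Pre_convert_3d_board_to_str board) := by
  unfold Pre_convert_3d_board_to_str; infer_instance

def pvWitness_convert_3d_board_to_str : List (List (List Int)) :=
  [[[5, 1, 0, 3, 0, 5, 0, 7, 0, 9]]]

def Spec_convert_3d_board_to_str (board : List (List (List Int))) (out : String) : Prop := out = convert_3d_board_to_str_alt board
instance (board : List (List (List Int))) (out : String) : Decidable (Spec_convert_3d_board_to_str board out) := by unfold Spec_convert_3d_board_to_str; infer_instance

-- ===== CLAIM (what is proved, stated in full; the proofs are below) =====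
def Claim_equal_convert_3d_board_to_str : Prop := ∀ (board : List (List (List Int))), Dom_convert_3d_board_to_str board → Pre_convert_3d_board_to_str board → Spec_convert_3d_board_to_str board (convert_3d_board_to_str board)

-- ===== LEMMAS AND PROOFS =====

-- canonical per-cell char contributions
def pvN (k : Int) (cell : List Int) : List Char := pvSub (PySem.List.pyGetD cell k 0)
def pvL (cell : List Int) : List Char := PySem.Int.toChars (PySem.List.pyGetD cell (-1) 0)

-- A's inner j-loop over range(m) with row[j] is the loop over the first m cells of the row
theorem foldl_pyRange_take {β : Type} (row : List (List Int)) (m : Nat) (h : m ≤ row.length)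
    (f : β → List Int → β) (init : β) :
    (PySem.List.pyRange 0 (m : Int) 1).foldl
      (fun acc j => f acc (PySem.List.pyGetD row j [])) init = (row.take m).foldl f init := by
  have hlen : (row.take m).length = m := by simp [h]
  have := PySem.List.foldl_pyRange_zero_pyGetD' (row.take m) [] f init
  rw [hlen] at this
  rw [← this]
  refine PySem.List.foldl_congr_mem _ _ _ _ ?_
  intro acc x hx
  rw [PySem.List.mem_pyRange_one] at hx
  rw [PySem.List.pyGetD_eq_getElem row [] hx.1 (by omega),
      PySem.List.pyGetD_eq_getElem (row.take m) [] hx.1 (by rw [hlen]; omega)]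
  simp [List.getElem_take]

-- A's 9-buffer note loop, characterised (stated in zeta-reduced form)
theorem notesA_fold (cells : List (List Int)) (b1 b2 b3 b4 b5 b6 b7 b8 b9 : List Char) :
    cells.foldl (fun bufs cell =>
        (PySem.List.pyRange 1 10 1).foldl (fun bufs k =>
          bufs.modify (k - 1).toNat (fun x => x ++
            if PySem.Int.toChars (PySem.List.pyGetD (PySem.List.slice cell none none) k 0) = ['0']
            then ['.']
            else PySem.Int.toChars (PySem.List.pyGetD (PySem.List.slice cell none none) k 0))) bufs)
      [b1, b2, b3, b4, b5, b6, b7, b8, b9] =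
    [b1 ++ cells.flatMap (pvN 1), b2 ++ cells.flatMap (pvN 2), b3 ++ cells.flatMap (pvN 3),
     b4 ++ cells.flatMap (pvN 4), b5 ++ cells.flatMap (pvN 5), b6 ++ cells.flatMap (pvN 6),
     b7 ++ cells.flatMap (pvN 7), b8 ++ cells.flatMap (pvN 8), b9 ++ cells.flatMap (pvN 9)] := by
  induction cells generalizing b1 b2 b3 b4 b5 b6 b7 b8 b9 with
  | nil => simp
  | cons c t ih =>
      rw [List.foldl_cons]
      have hstep : (PySem.List.pyRange 1 10 1).foldl (fun bufs k =>
          bufs.modify (k - 1).toNat (fun x => x ++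
            if PySem.Int.toChars (PySem.List.pyGetD (PySem.List.slice c none none) k 0) = ['0']
            then ['.']
            else PySem.Int.toChars (PySem.List.pyGetD (PySem.List.slice c none none) k 0)))
          [b1, b2, b3, b4, b5, b6, b7, b8, b9] =
          [b1 ++ pvN 1 c, b2 ++ pvN 2 c, b3 ++ pvN 3 c, b4 ++ pvN 4 c, b5 ++ pvN 5 c,
           b6 ++ pvN 6 c, b7 ++ pvN 7 c, b8 ++ pvN 8 c, b9 ++ pvN 9 c] := by
        have hr : PySem.List.pyRange 1 10 1 = [1,2,3,4,5,6,7,8,9] := by decide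
        rw [hr]; simp only [PySem.List.slice_none_none]; rfl
      rw [hstep, ih]
      simp [pvN]

-- B's fused triple-buffer loop, characterised
theorem foldB (cells : List (List Int)) (b0 : List Char)
    (n1 n2 n3 n4 n5 n6 n7 n8 n9 : List Char) (l0 : List Char) :
    cells.foldl (fun st cell =>
        ( st.1 ++ pvSub (PySem.List.pyGetD cell 0 0),
          (PySem.List.enumerate st.2.1).map (fun kb => kb.2 ++ pvSub (PySem.List.pyGetD cell (kb.1 + 1) 0)),
          st.2.2 ++ PySem.Int.toChars (PySem.List.pyGetD cell (-1) 0) ))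
      (b0, [n1, n2, n3, n4, n5, n6, n7, n8, n9], l0) =
    (b0 ++ cells.flatMap (pvN 0),
     [n1 ++ cells.flatMap (pvN 1), n2 ++ cells.flatMap (pvN 2), n3 ++ cells.flatMap (pvN 3),
      n4 ++ cells.flatMap (pvN 4), n5 ++ cells.flatMap (pvN 5), n6 ++ cells.flatMap (pvN 6),
      n7 ++ cells.flatMap (pvN 7), n8 ++ cells.flatMap (pvN 8), n9 ++ cells.flatMap (pvN 9)],
     l0 ++ cells.flatMap pvL) := by
  induction cells generalizing b0 n1 n2 n3 n4 n5 n6 n7 n8 n9 l0 with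
  | nil => simp
  | cons c t ih =>
      rw [List.foldl_cons]
      show t.foldl _ (b0 ++ pvSub (PySem.List.pyGetD c 0 0),
        [n1 ++ pvN 1 c, n2 ++ pvN 2 c, n3 ++ pvN 3 c, n4 ++ pvN 4 c, n5 ++ pvN 5 c,
         n6 ++ pvN 6 c, n7 ++ pvN 7 c, n8 ++ pvN 8 c, n9 ++ pvN 9 c],
        l0 ++ pvL c) = _
      rw [ih]
      simp [pvN, pvSub, pvL]

-- canonical common form of both outputs
def pvCanon (board : List (List (List Int))) : String :=
  let cells := (board.map (fun r => r.take (board.headD []).length)).flatten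
  String.mk (cells.flatMap (pvN 0) ++ ['\n'] ++
    PySem.Chars.join ['\n']
      [cells.flatMap (pvN 1), cells.flatMap (pvN 2), cells.flatMap (pvN 3),
       cells.flatMap (pvN 4), cells.flatMap (pvN 5), cells.flatMap (pvN 6),
       cells.flatMap (pvN 7), cells.flatMap (pvN 8), cells.flatMap (pvN 9)] ++
    ['\n'] ++ cells.flatMap pvL)

theorem foldl_nested_flat_map {a b : Type} (xss : List (List a)) (F : List a -> List a)
    (g : b -> a -> b) (init : b) :
    xss.foldl (fun acc xs => (F xs).foldl g acc) init = ((xss.map F).flatten).foldl g init := by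
  induction xss generalizing init with
  | nil => rfl
  | cons xs t ih => simp [List.foldl_cons, ih]

theorem nestedA {b : Type} (board : List (List (List Int))) (m : Nat)
    (h : forall row, row ∈ board -> m ≤ row.length) (g : b -> List Int -> b) (init : b) :
    (PySem.List.pyRange 0 (board.length : Int) 1).foldl (fun acc i =>
      (PySem.List.pyRange 0 (m : Int) 1).foldl (fun acc j =>
        g acc (PySem.List.pyGetD (PySem.List.pyGetD board i []) j [])) acc) init
    = ((board.map (fun r => r.take m)).flatten).foldl g init := by
  rw [PySem.List.foldl_pyRange_zero_pyGetD' board []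
      (fun acc row => (PySem.List.pyRange 0 (m : Int) 1).foldl
        (fun a j => g a (PySem.List.pyGetD row j [])) acc) init]
  rw [PySem.List.foldl_congr_mem board _ (fun acc row => (row.take m).foldl g acc) init
      (fun acc row hrow => foldl_pyRange_take row m (h row hrow) g acc)]
  exact foldl_nested_flat_map board _ g init

theorem A_eq (board : List (List (List Int))) (hpre : Pre_convert_3d_board_to_str board) :
    convert_3d_board_to_str board = pvCanon board := by
  obtain ⟨hne, hrows⟩ := hpre
  cases board with
  | nil => exact absurd rfl hne
  | cons r0 rest =>
    have hr : forall row, row ∈ (r0 :: rest : List (List (List Int))) -> r0.length ≤ row.length :=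
      fun row hrow => (hrows row hrow).1
    unfold convert_3d_board_to_str pvCanon
    have hget : ((PySem.List.pyGet? (r0 :: rest : List (List (List Int))) 0).getD []) = r0 := by
      simp [pysem]
    simp only [hget, List.headD_cons]
    refine congrArg String.mk ?_
    congr 1
    · congr 1
      · congr 1
        · congr 1
          · -- board_str
            refine (nestedA (r0 :: rest) r0.length hr
              (fun acc cell => acc ++ pvN 0 cell) []).trans ?_
            rw [PySem.List.foldl_append_eq_flatMap, List.nil_append]
        · -- notes
          refine congrArg (PySem.Chars.join ['\n']) ?_
          refine Eq.trans (b := ((r0 :: rest).map (fun r => r.take r0.length)).flatten.foldl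
              (fun bufs cell =>
                (PySem.List.pyRange 1 10 1).foldl (fun bufs k =>
                  bufs.modify (k - 1).toNat (fun x => x ++
                    if PySem.Int.toChars (PySem.List.pyGetD (PySem.List.slice cell none none) k 0) = ['0']
                    then ['.']
                    else PySem.Int.toChars (PySem.List.pyGetD (PySem.List.slice cell none none) k 0))) bufs)
              ((PySem.List.pyRange 1 10 1).map (fun _ => ([] : List Char)))) ?_ ?_
          · exact nestedA (r0 :: rest) r0.length hr
              (fun bufs cell =>
                (PySem.List.pyRange 1 10 1).foldl (fun bufs k =>
                  bufs.modify (k - 1).toNat (fun x => x ++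
                    if PySem.Int.toChars (PySem.List.pyGetD (PySem.List.slice cell none none) k 0) = ['0']
                    then ['.']
                    else PySem.Int.toChars (PySem.List.pyGetD (PySem.List.slice cell none none) k 0))) bufs)
              ((PySem.List.pyRange 1 10 1).map (fun _ => ([] : List Char)))
          · rw [show (PySem.List.pyRange 1 10 1).map (fun _ => ([] : List Char)) =
                [[], [], [], [], [], [], [], [], []] from by decide]
            exact notesA_fold _ [] [] [] [] [] [] [] [] []
    · -- locked
      refine (nestedA (r0 :: rest) r0.length hr
        (fun acc cell => acc ++ pvL cell) []).trans ?_
      rw [PySem.List.foldl_append_eq_flatMap, List.nil_append]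

theorem B_eq (board : List (List (List Int))) (hne : board ≠ []) :
    convert_3d_board_to_str_alt board = pvCanon board := by
  cases board with
  | nil => exact absurd rfl hne
  | cons r0 rest =>
    unfold convert_3d_board_to_str_alt pvCanon
    have hget : ((PySem.List.pyGet? (r0 :: rest : List (List (List Int))) 0).getD []) = r0 := by
      simp [pysem]
    simp only [hget, List.headD_cons, PySem.List.slice_to_natCast]
    have hst : (r0 :: rest).foldl (fun st row =>
        (List.take r0.length row).foldl (fun (st : List Char × List (List Char) × List Char) cell =>
          ( st.1 ++ pvSub (PySem.List.pyGetD cell 0 0),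
            (PySem.List.enumerate st.2.1).map (fun kb => kb.2 ++ pvSub (PySem.List.pyGetD cell (kb.1 + 1) 0)),
            st.2.2 ++ PySem.Int.toChars (PySem.List.pyGetD cell (-1) 0) )) st)
        (([] : List Char), List.replicate 9 ([] : List Char), ([] : List Char)) =
        (((r0 :: rest).map (fun r => r.take r0.length)).flatten.flatMap (pvN 0),
         [((r0 :: rest).map (fun r => r.take r0.length)).flatten.flatMap (pvN 1),
          ((r0 :: rest).map (fun r => r.take r0.length)).flatten.flatMap (pvN 2),
          ((r0 :: rest).map (fun r => r.take r0.length)).flatten.flatMap (pvN 3),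
          ((r0 :: rest).map (fun r => r.take r0.length)).flatten.flatMap (pvN 4),
          ((r0 :: rest).map (fun r => r.take r0.length)).flatten.flatMap (pvN 5),
          ((r0 :: rest).map (fun r => r.take r0.length)).flatten.flatMap (pvN 6),
          ((r0 :: rest).map (fun r => r.take r0.length)).flatten.flatMap (pvN 7),
          ((r0 :: rest).map (fun r => r.take r0.length)).flatten.flatMap (pvN 8),
          ((r0 :: rest).map (fun r => r.take r0.length)).flatten.flatMap (pvN 9)],
         ((r0 :: rest).map (fun r => r.take r0.length)).flatten.flatMap pvL) := by
      refine (foldl_nested_flat_map (r0 :: rest) (fun r => List.take r0.length r) _ _).trans ?_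
      refine (foldB _ [] [] [] [] [] [] [] [] [] [] []).trans ?_
      simp
    rw [hst]

-- ===== VERDICT (by name: the statement is the Claim_ definition above) =====
theorem convert_3d_board_to_str_spec : Claim_equal_convert_3d_board_to_str := by
  intro board _ hpre
  exact (A_eq board hpre).trans (B_eq board hpre.1).symm
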